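-- pv_equiv track=rewrite | github.com/vyuhaameddata/Vyuhaa_Flexure_Relay | vyuhaa_client/api/api_client.py | compute_scan_order
-- ===== SOURCE A (Python) =====
-- def compute_scan_order(cols: int, rows: int, pattern: str) -> list[tuple[int, int]]:
--     """Return ordered list of (row, col) tuples for the given pattern."""
--     tiles: list[tuple[int, int]] = []
--     if pattern == "raster":
--         for r in range(rows):
--             for c in range(cols):
--                 tiles.append((r, c))
--     elif pattern == "snake":
--         for r in range(rows):
--             cols_range = range(cols) if r % 2 == 0 else range(cols - 1, -1, -1)
--             for c in cols_range:
--                 tiles.append((r, c))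
--     elif pattern == "spiral":
--         top, bot, left, right = 0, rows - 1, 0, cols - 1
--         while top <= bot and left <= right:
--             for c in range(left, right + 1):
--                 tiles.append((top, c))
--             top += 1
--             for r in range(top, bot + 1):
--                 tiles.append((r, right))
--             right -= 1
--             if top <= bot:
--                 for c in range(right, left - 1, -1):
--                     tiles.append((bot, c))
--                 bot -= 1
--             if left <= right:
--                 for r in range(bot, top - 1, -1):
--                     tiles.append((r, left))
--                 left += 1
--     return tiles
-- ===== SOURCE B (Python) =====
-- def compute_scan_order(cols: int, rows: int, pattern: str) -> list[tuple[int, int]]: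
--     """Return ordered list of (row, col) tuples for the given pattern."""
--     tiles: list[tuple[int, int]] = []
--     if pattern == "raster":
--         tiles = [(r, c) for r in range(rows) for c in range(cols)]
--     elif pattern == "snake":
--         tiles = [(r, c) for r in range(rows)
--                  for c in (range(cols) if r % 2 == 0 else reversed(range(cols)))]
--     elif pattern == "spiral" and rows > 0 and cols > 0:
--         # direction-vector walk: start just left of (0,0), heading east;
--         # run lengths alternate between a shrinking column count and row count.
--         r, c = 0, -1
--         dr, dc = 0, 1
--         run_a, run_b = cols, rows - 1
--         use_a = True
--         while (run_a if use_a else run_b) > 0: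
--             if use_a:
--                 n, run_a = run_a, run_a - 1
--             else:
--                 n, run_b = run_b, run_b - 1
--             for _ in range(n):
--                 r += dr
--                 c += dc
--                 tiles.append((r, c))
--             dr, dc = dc, -dr
--             use_a = not use_a
--     return tiles
-- ===== Notes on version B (the rewrite author's own statement) =====
-- stated objective: alternative
-- what changed: The spiral branch is re-implemented as a direction-vector walk (position + rotating (dr,dc) with alternating shrinking run lengths) instead of four explicit boundary loops with top/bot/left/right shrinkage, and raster/snake become comprehensions over ranges instead of append loops.
import Mathlib
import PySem

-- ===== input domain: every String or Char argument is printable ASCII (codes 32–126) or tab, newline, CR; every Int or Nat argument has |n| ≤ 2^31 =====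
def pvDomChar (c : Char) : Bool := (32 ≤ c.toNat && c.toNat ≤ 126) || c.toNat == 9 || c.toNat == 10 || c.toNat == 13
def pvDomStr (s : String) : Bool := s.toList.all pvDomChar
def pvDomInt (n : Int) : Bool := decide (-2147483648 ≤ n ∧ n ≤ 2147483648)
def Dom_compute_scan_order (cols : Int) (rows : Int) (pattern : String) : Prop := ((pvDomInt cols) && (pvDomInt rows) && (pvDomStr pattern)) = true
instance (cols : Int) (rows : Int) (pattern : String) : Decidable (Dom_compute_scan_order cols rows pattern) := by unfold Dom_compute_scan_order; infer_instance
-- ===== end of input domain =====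

-- B replaces A's four-boundary spiral loop by a direction-vector walk with rotating (dr,dc)
-- and alternating shrinking run lengths; raster/snake become range comprehensions (alternative, same cost).

-- ===== PORT A =====
-- the spiral while-loop of A; fuel only makes the recursion structural (guard is checked first)
def pvSpiralA : Nat → Int → Int → Int → Int → List (Int × Int) → List (Int × Int)
  | 0, _, _, _, _, acc => acc
  | Nat.succ f, top, bot, left, right, acc =>
    if top ≤ bot ∧ left ≤ right then
      let acc1 := (PySem.List.pyRange left (right + 1) 1).foldl (fun a c => a ++ [(top, c)]) acc
      let top1 := top + 1
      let acc2 := (PySem.List.pyRange top1 (bot + 1) 1).foldl (fun a r => a ++ [(r, right)]) acc1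
      let right1 := right - 1
      let p3 : List (Int × Int) × Int :=
        if top1 ≤ bot then
          ((PySem.List.pyRange right1 (left - 1) (-1)).foldl (fun a c => a ++ [(bot, c)]) acc2, bot - 1)
        else (acc2, bot)
      let p4 : List (Int × Int) × Int :=
        if left ≤ right1 then
          ((PySem.List.pyRange p3.2 (top1 - 1) (-1)).foldl (fun a r => a ++ [(r, left)]) p3.1, left + 1)
        else (p3.1, left)
      pvSpiralA f top1 p3.2 p4.2 right1 p4.1
    else acc

def compute_scan_order (cols : Int) (rows : Int) (pattern : String) : List (Int × Int) :=
  if pattern == "raster" then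
    (PySem.List.pyRange 0 rows 1).foldl (fun acc r =>
      (PySem.List.pyRange 0 cols 1).foldl (fun a c => a ++ [(r, c)]) acc) []
  else if pattern == "snake" then
    (PySem.List.pyRange 0 rows 1).foldl (fun acc r =>
      ((if PySem.Int.mod r 2 == 0 then PySem.List.pyRange 0 cols 1
        else PySem.List.pyRange (cols - 1) (-1) (-1)).foldl (fun a c => a ++ [(r, c)]) acc)) []
  else if pattern == "spiral" then
    pvSpiralA ((rows + cols).toNat + 1) 0 (rows - 1) 0 (cols - 1) []
  else []

-- ===== PORT B =====
-- one step of the inner `for _ in range(n)` walk: advance the position, append the new cell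
def pvStep (dr dc : Int) : (Int × Int × List (Int × Int)) → Int → (Int × Int × List (Int × Int))
  | (r, c, ts), _ => (r + dr, c + dc, ts ++ [(r + dr, c + dc)])

-- the direction-vector while-loop of B; fuel only makes the recursion structural
def pvSpiralB : Nat → Int → Int → Int → Int → Int → Int → Bool → List (Int × Int) → List (Int × Int)
  | 0, _, _, _, _, _, _, _, ts => ts
  | Nat.succ f, r, c, dr, dc, ra, rb, useA, ts =>
    if 0 < (if useA then ra else rb) then
      let n := if useA then ra else rb
      let ra' := if useA then ra - 1 else ra
      let rb' := if useA then rb else rb - 1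
      let s := (PySem.List.pyRange 0 n 1).foldl (pvStep dr dc) (r, c, ts)
      pvSpiralB f s.1 s.2.1 dc (-dr) ra' rb' (!useA) s.2.2
    else ts

def compute_scan_order_alt (cols : Int) (rows : Int) (pattern : String) : List (Int × Int) :=
  if pattern == "raster" then
    (PySem.List.pyRange 0 rows 1).flatMap (fun r =>
      (PySem.List.pyRange 0 cols 1).map (fun c => (r, c)))
  else if pattern == "snake" then
    (PySem.List.pyRange 0 rows 1).flatMap (fun r =>
      ((if PySem.Int.mod r 2 == 0 then PySem.List.pyRange 0 cols 1
        else (PySem.List.pyRange 0 cols 1).reverse).map (fun c => (r, c))))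
  else if pattern == "spiral" && (0 < rows && 0 < cols) then
    pvSpiralB (4 * ((rows + cols).toNat + 1) + 1) 0 (-1) 0 1 cols (rows - 1) true []
  else []

-- ===== PRECONDITION & SPEC =====
def Spec_compute_scan_order (cols : Int) (rows : Int) (pattern : String) (out : List (Int × Int)) : Prop := out = compute_scan_order_alt cols rows pattern
instance (cols : Int) (rows : Int) (pattern : String) (out : List (Int × Int)) : Decidable (Spec_compute_scan_order cols rows pattern out) := by unfold Spec_compute_scan_order; infer_instance

-- ===== CLAIM (what is proved, stated in full; the proofs are below) =====
def Claim_equal_compute_scan_order : Prop := ∀ (cols : Int) (rows : Int) (pattern : String), Dom_compute_scan_order cols rows pattern → Spec_compute_scan_order cols rows pattern (compute_scan_order cols rows pattern)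

-- ===== LEMMAS AND PROOFS =====

-- a run of k walk steps in direction (dr,dc): closed form of the foldl
theorem pvStep_run (dr dc : Int) : ∀ (l : List Int) (r c : Int) (ts : List (Int × Int)),
    l.foldl (pvStep dr dc) (r, c, ts) =
      (r + (l.length : Int) * dr, c + (l.length : Int) * dc,
       ts ++ (List.range l.length).map (fun i : Nat => (r + ((i : Int) + 1) * dr, c + ((i : Int) + 1) * dc))) := by
  intro l
  induction l with
  | nil => intro r c ts; simp
  | cons x xs ih =>
    intro r c ts
    simp only [List.foldl_cons, pvStep, ih, List.length_cons, List.range_succ_eq_map,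
      List.map_cons, List.map_map, Prod.ext_iff]
    refine ⟨by push_cast; ring, by push_cast; ring, ?_⟩
    simp only [List.append_assoc, List.singleton_append]
    congr 1
    congr 1
    · simp only [Prod.ext_iff]; constructor <;> · push_cast; ring
    · apply List.map_congr_left; intro i _
      simp only [Function.comp_apply, Prod.ext_iff]
      constructor <;> · push_cast; ring

theorem pvSpiralA_stop (fa : Nat) (top bot left right : Int) (acc : List (Int × Int))
    (h : ¬(top ≤ bot ∧ left ≤ right)) : pvSpiralA fa top bot left right acc = acc := by
  cases fa with
  | zero => rfl
  | succ f => simp only [pvSpiralA, if_neg h]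

theorem pvSpiralB_stop (fb : Nat) (r c dr dc ra rb : Int) (useA : Bool) (ts : List (Int × Int))
    (h : ¬ 0 < (if useA then ra else rb)) : pvSpiralB fb r c dr dc ra rb useA ts = ts := by
  cases fb with
  | zero => rfl
  | succ f => simp only [pvSpiralB, if_neg h]

-- one segment of the walk, with the run written in closed form
theorem pvSpiralB_step (f : Nat) (r c dr dc ra rb : Int) (useA : Bool) (ts : List (Int × Int))
    (h : 0 < (if useA then ra else rb)) :
    pvSpiralB (f + 1) r c dr dc ra rb useA ts =
      pvSpiralB f (r + (if useA then ra else rb) * dr) (c + (if useA then ra else rb) * dc) dc (-dr)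
        (if useA then ra - 1 else ra) (if useA then rb else rb - 1) (!useA)
        (ts ++ (List.range (if useA then ra else rb).toNat).map
          (fun i : Nat => (r + ((i : Int) + 1) * dr, c + ((i : Int) + 1) * dc))) := by
  simp only [pvSpiralB, if_pos h, pvStep_run, PySem.List.pyRange_one]
  have : ((if useA then ra else rb) - 0).toNat = (if useA then ra else rb).toNat := by omega
  rw [this]
  have h2 : (((if useA then ra else rb).toNat : Int)) = (if useA then ra else rb) := by omega
  simp [h2]


-- the four ring segments, rewritten from A's pyRange form into B's range-walk form
theorem pvSegE (top left right : Int) :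
    (PySem.List.pyRange left (right + 1) 1).map (fun c => ((top : Int), c)) =
      (List.range (right - left + 1).toNat).map
        (fun i : Nat => ((top : Int), left - 1 + ((i : Int) + 1))) := by
  rw [PySem.List.pyRange_one, List.map_map,
    show (right + 1 - left).toNat = (right - left + 1).toNat from by omega]
  exact List.map_congr_left fun i _ => by
    simp only [Function.comp_apply, Prod.ext_iff]
    exact ⟨trivial, by ring⟩

theorem pvSegS (top bot left right : Int) :
    (PySem.List.pyRange (top + 1) (bot + 1) 1).map (fun r => (r, right)) =
      (List.range (bot - top).toNat).map
        (fun i : Nat => (top + ((i : Int) + 1), left - 1 + (right - left + 1))) := by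
  rw [PySem.List.pyRange_one, List.map_map,
    show (bot + 1 - (top + 1)).toNat = (bot - top).toNat from by omega]
  exact List.map_congr_left fun i _ => by
    simp only [Function.comp_apply, Prod.ext_iff]
    exact ⟨by ring, by ring⟩

theorem pvSegW (top bot left right : Int) :
    (PySem.List.pyRange (right - 1) (left - 1) (-1)).map (fun c => (bot, c)) =
      (List.range (right - left + 1 - 1).toNat).map
        (fun i : Nat => (top + (bot - top), left - 1 + (right - left + 1) + -((i : Int) + 1))) := by
  rw [PySem.List.pyRange_neg_one, List.map_map,
    show (right - 1 - (left - 1)).toNat = (right - left + 1 - 1).toNat from by omega]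
  exact List.map_congr_left fun i _ => by
    simp only [Function.comp_apply, Prod.ext_iff]
    exact ⟨by ring, by ring⟩

theorem pvSegN (top bot left right : Int) :
    (PySem.List.pyRange (bot - 1) (top + 1 - 1) (-1)).map (fun r => (r, left)) =
      (List.range (bot - top - 1).toNat).map
        (fun i : Nat => (top + (bot - top) + -((i : Int) + 1),
          left - 1 + (right - left + 1) + -(right - left + 1 - 1))) := by
  rw [PySem.List.pyRange_neg_one, List.map_map,
    show (bot - 1 - (top + 1 - 1)).toNat = (bot - top - 1).toNat from by omega]
  exact List.map_congr_left fun i _ => by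
    simp only [Function.comp_apply, Prod.ext_iff]
    exact ⟨by ring, by ring⟩

-- the heart: A's boundary-shrink loop equals B's direction walk on any sub-rectangle
theorem pv_spiral_eq : ∀ (F : Nat) (top bot left right : Int) (acc : List (Int × Int)) (fa fb : Nat),
    top ≤ bot → (bot - top + (right - left)).toNat < F → F ≤ fa → 4 * F + 1 ≤ fb →
    pvSpiralA fa top bot left right acc =
      pvSpiralB fb top (left - 1) 0 1 (right - left + 1) (bot - top) true acc := by
  intro F
  induction F with
  | zero =>
    intro top bot left right acc fa fb _ h2 _ _
    exact absurd h2 (by omega)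
  | succ F ih =>
    intro top bot left right acc fa fb htb hm hfa hfb
    obtain ⟨fa', rfl⟩ : ∃ fa', fa = fa' + 1 := ⟨fa - 1, by omega⟩
    obtain ⟨k, rfl⟩ : ∃ k, fb = k + 5 := ⟨fb - 5, by omega⟩
    by_cases hlr : left ≤ right
    swap
    · rw [pvSpiralA_stop _ _ _ _ _ _ (fun hc => hlr hc.2),
        pvSpiralB_stop _ _ _ _ _ _ _ _ _ (by rw [if_pos rfl]; omega)]
    · rw [show k + 5 = (k + 4) + 1 from rfl,
        pvSpiralB_step _ _ _ _ _ _ _ _ _ (by rw [if_pos rfl]; omega)]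
      simp only [Bool.not_true, 
        if_true, mul_zero, mul_one, add_zero, neg_zero]
      by_cases h1 : top + 1 ≤ bot
      · rw [show k + 4 = (k + 3) + 1 from rfl,
          pvSpiralB_step _ _ _ _ _ _ _ _ _ (by rw [if_neg (by decide)]; omega)]
        simp only [Bool.not_false, Bool.false_eq_true, 
          if_false, mul_zero, mul_one, add_zero, 
          List.append_assoc]
        by_cases h2 : left ≤ right - 1
        · rw [show k + 3 = (k + 2) + 1 from rfl,
            pvSpiralB_step _ _ _ _ _ _ _ _ _ (by rw [if_pos rfl]; omega)]
          simp only [Bool.not_true, 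
            if_true, mul_zero, mul_one, add_zero, neg_zero, mul_neg,
            List.append_assoc]
          by_cases h3 : top + 1 ≤ bot - 1
          · rw [show k + 2 = (k + 1) + 1 from rfl,
              pvSpiralB_step _ _ _ _ _ _ _ _ _ (by rw [if_neg (by decide)]; omega)]
            simp only [Bool.not_false, Bool.false_eq_true, 
              if_false, mul_zero, mul_one, add_zero, neg_neg, mul_neg,
              List.append_assoc]
            simp only [pvSpiralA, PySem.List.foldl_append_singleton_eq_map,
              if_pos (show top ≤ bot ∧ left ≤ right from ⟨htb, hlr⟩), if_pos h1, if_pos h2,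
              List.append_assoc]
            refine (ih (top + 1) (bot - 1) (left + 1) (right - 1) _ fa' (k + 1) h3
              (by omega) (by omega) (by omega)).trans ?_
            rw [pvSegE top left right, pvSegS top bot left right, pvSegW top bot left right,
              pvSegN top bot left right,
              show left + 1 - 1 = left from by ring,
              show right - 1 - (left + 1) + 1 = right - left + 1 - 1 - 1 from by ring,
              show bot - 1 - (top + 1) = bot - top - 1 - 1 from by ring,
              show top + (bot - top) + -(bot - top - 1) = top + 1 from by ring,
              show left - 1 + (right - left + 1) + -(right - left + 1 - 1) = left from by ring]
          · -- h = 1: three segments on both sides, then both loops stop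
            rw [pvSpiralB_stop _ _ _ _ _ _ _ _ _ (by rw [if_neg (by decide)]; omega)]
            simp only [pvSpiralA, PySem.List.foldl_append_singleton_eq_map,
              if_pos (show top ≤ bot ∧ left ≤ right from ⟨htb, hlr⟩), if_pos h1, if_pos h2,
              show PySem.List.pyRange (bot - 1) (top + 1 - 1) (-1) = [] from
                PySem.List.pyRange_neg_one_eq_nil (by omega),
              List.map_nil, List.append_nil, List.append_assoc]
            rw [pvSpiralA_stop _ _ _ _ _ _ (fun hc => h3 hc.1),
              pvSegE top left right, pvSegS top bot left right, pvSegW top bot left right]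
        · -- w = 1: two segments on both sides, then both loops stop
          rw [pvSpiralB_stop _ _ _ _ _ _ _ _ _ (by rw [if_pos rfl]; omega)]
          simp only [pvSpiralA, PySem.List.foldl_append_singleton_eq_map,
            if_pos (show top ≤ bot ∧ left ≤ right from ⟨htb, hlr⟩), if_pos h1, if_neg h2,
            show PySem.List.pyRange (right - 1) (left - 1) (-1) = [] from
              PySem.List.pyRange_neg_one_eq_nil (by omega),
            List.map_nil, List.append_nil, List.append_assoc]
          rw [pvSpiralA_stop _ _ _ _ _ _ (fun hc => h2 hc.2),
            pvSegE top left right, pvSegS top bot left right]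
      · -- h = 0: one segment on both sides, then both loops stop
        rw [pvSpiralB_stop _ _ _ _ _ _ _ _ _ (by rw [if_neg (by decide)]; omega)]
        simp only [pvSpiralA, PySem.List.foldl_append_singleton_eq_map,
          if_pos (show top ≤ bot ∧ left ≤ right from ⟨htb, hlr⟩), if_neg h1,
          show PySem.List.pyRange (top + 1) (bot + 1) 1 = [] from
            PySem.List.pyRange_one_eq_nil (by omega),
          show PySem.List.pyRange bot (top + 1 - 1) (-1) = [] from
            PySem.List.pyRange_neg_one_eq_nil (by omega),
          List.map_nil, List.append_nil, List.append_assoc]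
        split_ifs with h2 <;>
          rw [pvSpiralA_stop _ _ _ _ _ _ (fun hc => h1 hc.1), pvSegE top left right]

-- ===== VERDICT (by name: the statement is the Claim_ definition above) =====
theorem compute_scan_order_spec : Claim_equal_compute_scan_order := by
  intro cols rows pattern _
  unfold Spec_compute_scan_order compute_scan_order compute_scan_order_alt
  by_cases hr : pattern == "raster"
  · simp only [hr, if_true, PySem.List.foldl_append_singleton_eq_map]
    rw [PySem.List.foldl_append_eq_flatMap]
    simp
  · simp only [Bool.not_eq_true] at hr
    by_cases hs : pattern == "snake"
    · simp only [hr, hs, Bool.false_eq_true, if_false, if_true,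
        PySem.List.foldl_append_singleton_eq_map]
      rw [PySem.List.foldl_append_eq_flatMap]
      simp only [List.nil_append, PySem.List.pyRange_neg_one_eq_reverse,
        show ((-1 : Int) + 1) = 0 from by ring, show cols - 1 + 1 = cols from by ring]
    · simp only [Bool.not_eq_true] at hs
      by_cases hp : pattern == "spiral"
      · simp only [hr, hs, hp, Bool.false_eq_true, if_false, if_true,
          Bool.true_and]
        by_cases hrow : 0 < rows
        · by_cases hcol : 0 < cols
          · rw [if_pos (show (decide (0 < rows) && decide (0 < cols)) = true from by
              simp [hrow, hcol])]
            have h := pv_spiral_eq ((rows + cols).toNat + 1) 0 (rows - 1) 0 (cols - 1) []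
              ((rows + cols).toNat + 1) (4 * ((rows + cols).toNat + 1) + 1)
              (by omega) (by omega) (le_refl _) (le_refl _)
            simpa using h
          · rw [if_neg (by simp [hcol]),
              pvSpiralA_stop _ _ _ _ _ _ (by omega)]
        · rw [if_neg (by simp [hrow]),
            pvSpiralA_stop _ _ _ _ _ _ (by omega)]
      · simp only [Bool.not_eq_true] at hp
        simp only [hr, hs, hp, Bool.false_eq_true, if_false, Bool.false_and]
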